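-- pv_equiv track=rewrite | github.com/draknarethorne/thorne-ui | .bin/regen_gems.py | _calculate_gem_positions
-- ===== SOURCE A (Python) =====
-- def _calculate_gem_positions(icon_size, grid_size):
--     """Calculate icon positions for output files (10×10 grid)."""
--     positions = []
--     # Icons start at (0,0) with buffer on right and bottom
--     # 10×24 = 240, leaving 16 pixels buffer on right/bottom in 256×256 image
--     # 10×22 = 220, leaving 36 pixels buffer on right/bottom in 256×256 image
--
--     for row in range(grid_size):
--         for col in range(grid_size):
--             x = col * icon_size
--             y = row * icon_size
--             positions.append((x, y))
--
--     return positions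
-- ===== SOURCE B (Python) =====
-- def _calculate_gem_positions(icon_size, grid_size):
--     """Calculate icon positions for output files (10x10 grid)."""
--     if grid_size <= 0:
--         return []
--     # Build the top row once, then derive each next row by shifting the
--     # previous one down by icon_size.
--     row = [(c * icon_size, 0) for c in range(grid_size)]
--     positions = list(row)
--     for _ in range(grid_size - 1):
--         row = [(x, y + icon_size) for (x, y) in row]
--         positions.extend(row)
--     return positions
-- ===== Notes on version B (the rewrite author's own statement) =====
-- stated objective: alternative
-- what changed: Instead of enumerating every (row, col) cell and multiplying both coordinates, B builds the first row of positions once and derives each subsequent row by translating the previous row down by icon_size, accumulating the rows.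
import Mathlib
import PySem

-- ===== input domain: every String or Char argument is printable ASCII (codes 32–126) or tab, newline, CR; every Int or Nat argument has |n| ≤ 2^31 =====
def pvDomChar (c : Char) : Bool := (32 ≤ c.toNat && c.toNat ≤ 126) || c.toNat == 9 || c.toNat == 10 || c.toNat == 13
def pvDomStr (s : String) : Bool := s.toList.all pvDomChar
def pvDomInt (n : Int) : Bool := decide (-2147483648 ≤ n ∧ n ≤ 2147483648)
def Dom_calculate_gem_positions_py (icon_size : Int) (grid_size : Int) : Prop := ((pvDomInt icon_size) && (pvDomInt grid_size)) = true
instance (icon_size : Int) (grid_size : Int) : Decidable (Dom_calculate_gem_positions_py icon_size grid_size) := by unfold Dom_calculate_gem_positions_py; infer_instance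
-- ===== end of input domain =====

-- B builds the first row once and derives each next row by translating the previous one down by icon_size (alternative decomposition, same cost).

-- ===== PORT A =====
def calculate_gem_positions_py (icon_size : Int) (grid_size : Int) : List (Int × Int) :=
  (PySem.List.pyRange 0 grid_size 1).foldl (fun positions row =>
    (PySem.List.pyRange 0 grid_size 1).foldl (fun positions col =>
      let x := col * icon_size
      let y := row * icon_size
      positions ++ [(x, y)]) positions) []

-- ===== PORT B =====
def calculate_gem_positions_py_alt (icon_size : Int) (grid_size : Int) : List (Int × Int) :=
  if grid_size ≤ 0 then []
  else
    let row0 := (PySem.List.pyRange 0 grid_size 1).map (fun c => (c * icon_size, (0 : Int)))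
    let st := (PySem.List.pyRange 0 (grid_size - 1) 1).foldl
      (fun (st : List (Int × Int) × List (Int × Int)) _ =>
        let row' := st.1.map (fun p => (p.1, p.2 + icon_size))
        (row', st.2 ++ row')) (row0, row0)
    st.2

-- ===== PRECONDITION & SPEC =====
def Spec_calculate_gem_positions_py (icon_size : Int) (grid_size : Int) (out : List (Int × Int)) : Prop := out = calculate_gem_positions_py_alt icon_size grid_size
instance (icon_size : Int) (grid_size : Int) (out : List (Int × Int)) : Decidable (Spec_calculate_gem_positions_py icon_size grid_size out) := by unfold Spec_calculate_gem_positions_py; infer_instance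

-- ===== CLAIM (what is proved, stated in full; the proofs are below) =====
def Claim_equal_calculate_gem_positions_py : Prop := ∀ (icon_size : Int) (grid_size : Int), Dom_calculate_gem_positions_py icon_size grid_size → Spec_calculate_gem_positions_py icon_size grid_size (calculate_gem_positions_py icon_size grid_size)

-- ===== LEMMAS AND PROOFS =====

-- one row of the grid, at row index r
def gemRow (i g r : Int) : List (Int × Int) :=
  (PySem.List.pyRange 0 g 1).map (fun c => (c * i, r * i))

-- A's nested loops, written as a flatMap of rows.
lemma gem_a_flatMap (i g : Int) :
    calculate_gem_positions_py i g
      = (PySem.List.pyRange 0 g 1).flatMap (fun row => gemRow i g row) := by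
  unfold calculate_gem_positions_py gemRow
  rw [show (fun (positions : List (Int × Int)) row =>
        (PySem.List.pyRange 0 g 1).foldl (fun positions col =>
          positions ++ [(col * i, row * i)]) positions)
      = (fun positions row => positions ++
          (PySem.List.pyRange 0 g 1).map (fun col => (col * i, row * i))) from by
    funext positions row
    exact PySem.List.foldl_append_singleton_eq_map _ _ _]
  simpa using PySem.List.foldl_append_eq_flatMap _ _ ([] : List (Int × Int))

-- translating a row down by i gives the next row
lemma gemRow_shift (i g r : Int) :
    (gemRow i g r).map (fun p => (p.1, p.2 + i)) = gemRow i g (r + 1) := by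
  unfold gemRow
  simp only [List.map_map]
  apply List.map_congr_left
  intro c _
  simp
  ring

-- invariant of B's row-translation loop
lemma gem_fold_inv (i g : Int) (l : List Int) : ∀ (r : Int) (P : List (Int × Int)),
    l.foldl (fun (st : List (Int × Int) × List (Int × Int)) _ =>
        let row' := st.1.map (fun p => (p.1, p.2 + i))
        (row', st.2 ++ row')) (gemRow i g r, P)
      = (gemRow i g (r + (l.length : Int)),
         P ++ (List.range l.length).flatMap (fun (j : Nat) => gemRow i g (r + 1 + (j : Int)))) := by
  induction l with
  | nil => intro r P; simp
  | cons a l ih =>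
    intro r P
    simp only [List.foldl_cons, gemRow_shift]
    rw [ih (r + 1) (P ++ gemRow i g (r + 1))]
    simp only [Prod.mk.injEq, List.length_cons]
    refine ⟨?_, ?_⟩
    · congr 1
      push_cast
      ring
    · rw [List.range_succ_eq_map, List.flatMap_cons, List.flatMap_map, List.append_assoc]
      have hf : (fun a : Nat => gemRow i g (r + 1 + (a.succ : Int)))
          = (fun j : Nat => gemRow i g (r + 1 + 1 + (j : Int))) := by
        funext a
        congr 1
        push_cast
        ring
      rw [hf]
      norm_num

-- ===== VERDICT (by name: the statement is the Claim_ definition above) =====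
theorem calculate_gem_positions_py_spec : Claim_equal_calculate_gem_positions_py := by
  intro i g _
  show calculate_gem_positions_py i g = calculate_gem_positions_py_alt i g
  rw [gem_a_flatMap]
  unfold calculate_gem_positions_py_alt
  by_cases hle : g ≤ 0
  · simp [hle, PySem.List.pyRange_one_eq_nil hle]
  · simp only [if_neg hle]
    have hrow0 : (PySem.List.pyRange 0 g 1).map (fun c => (c * i, (0 : Int)))
        = gemRow i g 0 := by
      unfold gemRow; simp
    rw [hrow0, gem_fold_inv i g _ 0 (gemRow i g 0)]
    have hlen : (PySem.List.pyRange 0 (g - 1) 1).length = (g - 1).toNat := by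
      simp [PySem.List.length_pyRange_one]
    rw [hlen]
    -- A's side: split off row 0
    have hn : g.toNat = (g - 1).toNat + 1 := by omega
    rw [PySem.List.pyRange_one, List.flatMap_map]
    simp only [sub_zero]
    rw [hn, List.range_succ_eq_map, List.flatMap_cons, List.flatMap_map]
    simp only [Nat.cast_zero, add_zero, zero_add]
    congr 1
    have hf : (fun a : Nat => gemRow i g (a.succ : Int))
        = (fun j : Nat => gemRow i g (1 + (j : Int))) := by
      funext a
      congr 1
      push_cast
      ring
    rw [hf]
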